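/- GENERATED by c/gen_decode.py: decode facts of the image, one per distinct instruction byte string. -/
import UserX.DecodeImage

#decode_all Vorbis.Dec
  "0f28cb"  -- movaps xmm1,xmm3
  "0f8451dbffff"  -- je 113b22
  "0f84f3010000"  -- je 11487b
  "0f8884fdffff"  -- js 10dc5c
  "0f8f4bfdffff"  -- jg 106010
  "0fb6b335060000"  -- movzx esi,BYTE PTR [rbx+0x635]
  "3985d0010000"  -- cmp DWORD PTR [rbp+0x1d0],eax
  "410fb61424"  -- movzx edx,BYTE PTR [r12]
  "4154"  -- push r12
  "41885e1b"  -- mov BYTE PTR [r14+0x1b],bl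
  "418b561c"  -- mov edx,DWORD PTR [r14+0x1c]
  "41c7850000c00000000000"  -- mov DWORD PTR [r13+0xc00000],0x0
  "438d5c3500"  -- lea ebx,[r13+r14*1+0x0]
  "4439e0"  -- cmp eax,r12d
  "44896d50"  -- mov DWORD PTR [rbp+0x50],r13d
  "4489f3"  -- mov ebx,r14d
  "448bab38060000"  -- mov r13d,DWORD PTR [rbx+0x638]
  "4539e5"  -- cmp r13d,r12d
  "458b3424"  -- mov r14d,DWORD PTR [r12]
  "4801f0"  -- add rax,rsi
  "48638384000000"  -- movsxd rax,DWORD PTR [rbx+0x84]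
  "48837b7000"  -- cmp QWORD PTR [rbx+0x70],0x0
  "48894330"  -- mov QWORD PTR [rbx+0x30],rax
  "4889e3"  -- mov rbx,rsp
  "488b742428"  -- mov rsi,QWORD PTR [rsp+0x28]
  "488d2c18"  -- lea rbp,[rax+rbx*1]
  "488d7b30"  -- lea rdi,[rbx+0x30]
  "488d8570ffffff"  -- lea rax,[rbp-0x90]
  "488dbc0341040000"  -- lea rdi,[rbx+rax*1+0x441]
  "48c1e002"  -- shl rax,0x2
  "4901c4"  -- add r12,rax
  "4963ee"  -- movsxd rbp,r14d
  "498b06"  -- mov rax,QWORD PTR [r14]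
  "498d7e02"  -- lea rdi,[r14+0x2]
  "49c1e404"  -- shl r12,0x4
  "4a8dbce3b8050000"  -- lea rdi,[rbx+r12*8+0x5b8]
  "4c63a560ffffff"  -- movsxd r12,DWORD PTR [rbp-0xa0]
  "4c89ea"  -- mov rdx,r13
  "4c8bbd58ffffff"  -- mov r15,QWORD PTR [rbp-0xa8]
  "4d03742420"  -- add r14,QWORD PTR [r12+0x20]
  "4d8d6c8500"  -- lea r13,[r13+rax*4+0x0]
  "660f2f05ebd70100"  -- comisd xmm0,QWORD PTR [rip+0x1d7eb]
  "66410f7ec7"  -- movd r15d,xmm0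
  "66c7046bffff"  -- mov WORD PTR [rbx+rbp*2],0xffff
  "742e"  -- je 102d0a
  "7522"  -- jne 113b15
  "7858"  -- js 115eea
  "7e34"  -- jle 115842
  "807d1a00"  -- cmp BYTE PTR [rbp+0x1a],0x0
  "83c001"  -- add eax,0x1
  "893424"  -- mov DWORD PTR [rsp],esi
  "8983e8040000"  -- mov DWORD PTR [rbx+0x4e8],eax
  "8b0424"  -- mov eax,DWORD PTR [rsp]
  "8b6bfc"  -- mov ebp,DWORD PTR [rbx-0x4]
  "8bb570ffffff"  -- mov esi,DWORD PTR [rbp-0x90]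
  "bb00000000"  -- mov ebx,0x0
  "c1ff0a"  -- sar edi,0xa
  "c7830800c00004f206f2"  -- mov DWORD PTR [rbx+0xc00008],0xf206f204
  "e801c1feff"  -- call 100640
  "e80b6cffff"  -- call 100640
  "e8168effff"  -- call 10d1c0
  "e81ef7feff"  -- call 100300
  "e8290fffff"  -- call 104c60
  "e83184ffff"  -- call 104c60
  "e83c9bffff"  -- call 100640
  "e847a9feff"  -- call 100800
  "e8520cffff"  -- call 100640
  "e85db5ffff"  -- call 100640
  "e86aecfeff"  -- call 100300
  "e875fbffff"  -- call 102040
  "e8816effff"  -- call 100800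
  "e88cc1feff"  -- call 100640
  "e895bafeff"  -- call 100300
  "e8a013ffff"  -- call 100800
  "e8aafaffff"  -- call 100059
  "e8b3b0feff"  -- call 100640
  "e8be67ffff"  -- call 100640
  "e8c89cfeff"  -- call 100480
  "e8d253ffff"  -- call 100640
  "e8dc65ffff"  -- call 10b100
  "e8e6600100"  -- call 1196c0
  "e8ee2effff"  -- call 100640
  "e8f8f7ffff"  -- call 10d440
  "e917d8ffff"  -- jmp 113b22
  "e962ffffff"  -- jmp 115121
  "e9b3edffff"  -- jmp 113b22
  "eb03"  -- jmp 10e615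
  "eb99"  -- jmp 103233
  "ebf2"  -- jmp 10476a
  "f20f590530470100"  -- mulsd xmm0,QWORD PTR [rip+0x14730]
  "f20f5e1dc0e10100"  -- divsd xmm3,QWORD PTR [rip+0x1e1c0]
  "f30f105be0"  -- movss xmm3,DWORD PTR [rbx-0x20]
  "f30f107da0"  -- movss xmm7,DWORD PTR [rbp-0x60]
  "f30f1155bc"  -- movss DWORD PTR [rbp-0x44],xmm2
  "f30f117db0"  -- movss DWORD PTR [rbp-0x50],xmm7
  "f30f5913"  -- mulss xmm2,DWORD PTR [rbx]
  "f30f5c63fc"  -- subss xmm4,DWORD PTR [rbx-0x4]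
  "f3410f106424f0"  -- movss xmm4,DWORD PTR [r12-0x10]
  "f7bd6cffffff"  -- idiv DWORD PTR [rbp-0x94]
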